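-- pv_equiv track=rewrite | github.com/jngsoo/PS | Codility/Counting_Elements/PermCheck.py | solution_trash
-- ===== SOURCE A (Python) =====
-- def solution_trash(A):
--     max = 0
--     for num in A:
--         if num >= max:
--             max = num
--
--     if max == len(A) and A.count(max) == 1:
--         return 1
--     return 0
-- ===== SOURCE B (Python) =====
-- def solution_trash(A):
--     if not A:
--         return 0
--     s = sorted(A)
--     m = s[-1]
--     if m == len(A) and s.count(m) == 1:
--         return 1
--     return 0
-- ===== Notes on version B (the rewrite author's own statement) =====
-- stated objective: alternative
-- what changed: Replaces A's running-max scan (with a 0 floor) and list.count pass by a sort-then-inspect strategy: sort A, read the maximum off the last element and count it in the sorted copy.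
import Mathlib
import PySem

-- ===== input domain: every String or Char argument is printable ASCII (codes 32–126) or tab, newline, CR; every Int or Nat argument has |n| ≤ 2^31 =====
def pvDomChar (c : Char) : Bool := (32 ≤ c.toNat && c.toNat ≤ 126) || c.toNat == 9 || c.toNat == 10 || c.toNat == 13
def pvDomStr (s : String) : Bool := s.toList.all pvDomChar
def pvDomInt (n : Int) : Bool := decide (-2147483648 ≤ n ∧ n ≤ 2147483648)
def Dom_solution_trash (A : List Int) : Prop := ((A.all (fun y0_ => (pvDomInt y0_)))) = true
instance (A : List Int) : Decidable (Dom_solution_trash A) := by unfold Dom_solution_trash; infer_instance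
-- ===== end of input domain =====

-- B replaces A's floored running-max scan + count pass by sort-then-inspect (last element = max); alternative decomposition, same results.


-- ===== PORT A =====
def solution_trash (A : List Int) : Int :=
  let mx := A.foldl (fun m num => if num ≥ m then num else m) 0
  if mx = (A.length : Int) ∧ PySem.List.count A mx = 1 then 1 else 0

-- ===== PORT B =====
def solution_trash_alt (A : List Int) : Int :=
  if A = [] then 0
  else
    let s := PySem.List.sorted A (fun x => x) false
    -- s[-1]: s is nonempty here, so pyGetD is exact (never the default)
    let m := PySem.List.pyGetD s (-1) 0
    if m = (A.length : Int) ∧ PySem.List.count s m = 1 then 1 else 0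

-- ===== PRECONDITION & SPEC =====
def Spec_solution_trash (A : List Int) (out : Int) : Prop := out = solution_trash_alt A
instance (A : List Int) (out : Int) : Decidable (Spec_solution_trash A out) := by unfold Spec_solution_trash; infer_instance

-- ===== CLAIM (what is proved, stated in full; the proofs are below) =====
def Claim_equal_solution_trash : Prop := ∀ (A : List Int), Dom_solution_trash A → Spec_solution_trash A (solution_trash A)

-- ===== LEMMAS AND PROOFS =====

-- A's loop body is exactly Int.max
theorem foldl_loop_eq_foldl_max (t : List Int) (a : Int) :
    t.foldl (fun m num => if num ≥ m then num else m) a = t.foldl max a := by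
  induction t generalizing a with
  | nil => rfl
  | cons x t ih =>
    have hx : (if x ≥ a then x else a) = max a x := by omega
    rw [List.foldl_cons, List.foldl_cons, hx, ih]

theorem foldl_max_shift (t : List Int) (a b : Int) :
    t.foldl max (max a b) = max a (t.foldl max b) := by
  induction t generalizing b with
  | nil => rfl
  | cons x t ih => simp only [List.foldl_cons, max_assoc, ih]

theorem solution_trash_spec_aux : ∀ (A : List Int), solution_trash A = solution_trash_alt A := by
  intro A
  match hA : A with
  | [] => decide
  | x :: t =>
    simp only [solution_trash, solution_trash_alt, if_neg (List.cons_ne_nil x t)]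
    set s := PySem.List.sorted (x :: t) (fun x => x) false with hs
    have hsne : s ≠ [] := by
      rw [hs, Ne, PySem.List.sorted_eq_nil_iff]; exact List.cons_ne_nil x t
    -- m = getLast s is the maximum of A
    rw [PySem.List.pyGetD_neg_one s 0 hsne]
    set m := s.getLast hsne with hm
    have hperm : s.Perm (x :: t) := PySem.List.sorted_perm _ _ _
    have hmA : m ∈ (x :: t) := hperm.mem_iff.mp (List.getLast_mem hsne)
    have hmmax : ∀ y ∈ (x :: t), y ≤ m := by
      intro y hy
      have hys : y ∈ s := hperm.mem_iff.mpr hy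
      have hpw : s.Pairwise (fun a b => (a : Int) ≤ b) := PySem.List.sorted_pairwise _ _
      have hlast : s.getLast? = some m := by
        rw [hm]; exact (List.getLast?_eq_some_getLast hsne)
      rcases (List.mem_iff_append).mp hys with ⟨l1, l2, hsplit⟩
      rcases l2.eq_nil_or_concat with h2 | ⟨l3, z, rfl⟩
      · subst h2
        have h1 : s.getLast? = some y := by rw [hsplit]; simp
        have : m = y := by rw [hlast] at h1; exact Option.some_injective _ h1
        omega
      · have h1 : s.getLast? = some z := by
          rw [hsplit]; rw [List.getLast?_append]
          simpa using List.getLast?_concat (l := y :: l3)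
        have hz : m = z := by rw [hlast] at h1; exact Option.some_injective _ h1
        have hyz : ([y, z] : List Int).Sublist s := by
          rw [hsplit]
          refine List.sublist_append_of_sublist_right ?_
          exact (List.cons_sublist_cons).mpr (by simp)
        have hle : (y : Int) ≤ z := List.pairwise_pair.mp (hpw.sublist hyz)
        omega
    -- A's running max with 0 floor
    rw [foldl_loop_eq_foldl_max]
    have hfold : (x :: t).foldl max 0 = max 0 (t.foldl max x) := by
      simp only [List.foldl_cons]
      have := foldl_max_shift t 0 x
      simpa using this
    have hM := PySem.List.max?_id_cons (x := x) (t := t)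
    have hMmem : t.foldl max x ∈ (x :: t) := PySem.List.max?_mem hM
    have hMmax : ∀ y ∈ (x :: t), y ≤ t.foldl max x := by
      intro y hy; simpa using PySem.List.max?_isMax hM y hy
    have hMm : t.foldl max x = m := le_antisymm (hmmax _ hMmem) (hMmax _ hmA)
    have hcount : PySem.List.count s m = PySem.List.count (x :: t) m := by
      simp only [PySem.List.count_eq]; exact hperm.count_eq m
    rw [hfold, hMm, hcount]
    by_cases hneg : m < 0
    · have hlen : (0 : Int) < ((x :: t).length : Int) := by
        simp
      rw [max_eq_left (le_of_lt hneg)]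
      rw [if_neg (by omega), if_neg (by rintro ⟨h1, -⟩; omega)]
    · rw [max_eq_right (by omega)]

-- ===== VERDICT (by name: the statement is the Claim_ definition above) =====
theorem solution_trash_spec : Claim_equal_solution_trash := by
  intro A _
  unfold Spec_solution_trash
  exact solution_trash_spec_aux A
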